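-- pv_equiv track=rewrite | github.com/gislasg78/Python-Staff-Project | EvensOdds.py | sum_of_evens_and_odds
-- ===== SOURCE A (Python) =====
-- def IsEven(number):
-- 	return not(number % 2)
--
-- def IsOdd(number):
-- 	return (number % 2)
--
-- def sum_of_evens_and_odds(numbers):
-- 	addition_evens, counter_evens = 0, 0
-- 	addition_odds, counter_odds = 0, 0
--
-- 	for number in numbers:
-- 		if (IsEven(number)):
-- 			counter_evens += 1
-- 			addition_evens += number
--
-- 		if (IsOdd(number)):
-- 			counter_odds += 1
-- 			addition_odds += number
--
-- 	return [[counter_evens, addition_evens], [counter_odds, addition_odds]]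
-- ===== SOURCE B (Python) =====
-- def sum_of_evens_and_odds(numbers):
--     nums = list(numbers)
--     evens = [n for n in nums if n % 2 == 0]
--     odds = [n for n in nums if n % 2 != 0]
--     return [[len(evens), sum(evens)], [len(odds), sum(odds)]]
-- ===== Notes on version B (the rewrite author's own statement) =====
-- stated objective: simpler
-- what changed: Replaces the single four-accumulator loop with two filter comprehensions and len/sum over each partition.
import Mathlib
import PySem

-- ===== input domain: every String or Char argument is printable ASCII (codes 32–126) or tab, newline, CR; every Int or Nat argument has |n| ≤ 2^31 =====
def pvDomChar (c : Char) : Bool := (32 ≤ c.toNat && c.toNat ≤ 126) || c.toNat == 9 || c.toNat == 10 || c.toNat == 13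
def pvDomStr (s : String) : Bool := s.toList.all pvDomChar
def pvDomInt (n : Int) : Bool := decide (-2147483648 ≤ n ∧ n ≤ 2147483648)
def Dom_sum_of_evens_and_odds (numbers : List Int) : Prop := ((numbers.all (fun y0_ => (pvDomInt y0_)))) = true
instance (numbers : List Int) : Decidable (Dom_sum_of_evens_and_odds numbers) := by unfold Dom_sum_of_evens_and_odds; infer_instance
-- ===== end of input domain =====

-- B replaces A's single four-accumulator loop by two filter partitions with len/sum (simpler decomposition).

-- ===== PORT A =====
def pvIsEven (number : Int) : Bool := !(PySem.Int.mod number 2 != 0)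

def pvIsOdd (number : Int) : Bool := PySem.Int.mod number 2 != 0

-- one iteration of A's loop body: state (addition_evens, counter_evens, addition_odds, counter_odds)
def pvLoopBody (s : Int × Int × Int × Int) (number : Int) : Int × Int × Int × Int :=
  let (ae, ce, ao, co) := s
  let (ce, ae) := if pvIsEven number then (ce + 1, ae + number) else (ce, ae)
  let (co, ao) := if pvIsOdd number then (co + 1, ao + number) else (co, ao)
  (ae, ce, ao, co)

def sum_of_evens_and_odds (numbers : List Int) : List (List Int) :=
  let st := numbers.foldl pvLoopBody (0, 0, 0, 0)
  [[st.2.1, st.1], [st.2.2.2, st.2.2.1]]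

-- ===== PORT B =====
def sum_of_evens_and_odds_alt (numbers : List Int) : List (List Int) :=
  let evens := numbers.filter (fun n => PySem.Int.mod n 2 == 0)
  let odds := numbers.filter (fun n => PySem.Int.mod n 2 != 0)
  [[(evens.length : Int), evens.sum], [(odds.length : Int), odds.sum]]

-- ===== PRECONDITION & SPEC =====
def Spec_sum_of_evens_and_odds (numbers : List Int) (out : List (List Int)) : Prop := out = sum_of_evens_and_odds_alt numbers
instance (numbers : List Int) (out : List (List Int)) : Decidable (Spec_sum_of_evens_and_odds numbers out) := by unfold Spec_sum_of_evens_and_odds; infer_instance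

-- ===== CLAIM (what is proved, stated in full; the proofs are below) =====
def Claim_equal_sum_of_evens_and_odds : Prop := ∀ (numbers : List Int), Dom_sum_of_evens_and_odds numbers → Spec_sum_of_evens_and_odds numbers (sum_of_evens_and_odds numbers)

-- ===== LEMMAS AND PROOFS =====
theorem pvLoopBody_eq (ae ce ao co x : Int) :
    pvLoopBody (ae, ce, ao, co) x =
      if PySem.Int.mod x 2 = 0 then (ae + x, ce + 1, ao, co) else (ae, ce, ao + x, co + 1) := by
  have hm : PySem.Int.mod x 2 = x % 2 := PySem.Int.mod_eq_emod_of_pos (by norm_num)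
  by_cases h : x % 2 = 0
  · simp [pvLoopBody, pvIsEven, pvIsOdd, h]
  · have h1 : x % 2 = 1 := by omega
    simp [pvLoopBody, pvIsEven, pvIsOdd, h1]

theorem sum_of_evens_and_odds_fold_inv (numbers : List Int) (ae ce ao co : Int) :
    numbers.foldl pvLoopBody (ae, ce, ao, co)
    = (ae + (numbers.filter (fun n => PySem.Int.mod n 2 == 0)).sum,
       ce + ((numbers.filter (fun n => PySem.Int.mod n 2 == 0)).length : Int),
       ao + (numbers.filter (fun n => PySem.Int.mod n 2 != 0)).sum,
       co + ((numbers.filter (fun n => PySem.Int.mod n 2 != 0)).length : Int)) := by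
  induction numbers generalizing ae ce ao co with
  | nil => simp
  | cons x xs ih =>
    rw [List.foldl_cons, pvLoopBody_eq]
    by_cases h : PySem.Int.mod x 2 = 0
    · rw [if_pos h]
      have hb : (PySem.Int.mod x 2 == 0) = true := by
        simp only [beq_iff_eq]; exact h
      simp only [List.filter_cons, hb, bne, Bool.not_true,
        Bool.false_eq_true, if_false, if_true, ih, List.sum_cons,
        List.length_cons, Prod.mk.injEq]
      push_cast
      and_intros <;> first | trivial | ring
    · rw [if_neg h]
      have hb : (PySem.Int.mod x 2 == 0) = false := by
        simp only [beq_eq_false_iff_ne, ne_eq]; exact h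
      simp only [List.filter_cons, hb, bne, Bool.not_false,
        Bool.false_eq_true, if_false, if_true, ih, List.sum_cons,
        List.length_cons, Prod.mk.injEq]
      push_cast
      and_intros <;> first | trivial | ring

-- ===== VERDICT (by name: the statement is the Claim_ definition above) =====
theorem sum_of_evens_and_odds_spec : Claim_equal_sum_of_evens_and_odds := by
  intro numbers _
  unfold Spec_sum_of_evens_and_odds sum_of_evens_and_odds sum_of_evens_and_odds_alt
  simp [sum_of_evens_and_odds_fold_inv]
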